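-- pv_equiv track=rewrite | github.com/RPINerd/biox_macguffins | macguffins/macguffin_utils.py | ret_od2_repr
-- ===== SOURCE A (Python) =====
-- def ret_od2_repr(seq: str) -> str:
--     """
--     Return Oligodesign2 representation of an IDT sequence
--
--     Args:
--         seq (str): IDT sequence with/without LNAs
--
--     Returns:
--         str: OD2 sequence
--     """
--     is_lna = False
--     od2_seq = []
--     for i, a in enumerate(seq):
--         assert a.upper() == a, "IDT bases should be upper case"
--         # Next base is an LNA base
--         if a == "+":
--             is_lna = True
--             continue
--         if is_lna:
--             od2_seq.append(a)
--         else: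
--             od2_seq.append(a.lower())
--         is_lna = False
--
--     return "".join(od2_seq)
-- ===== SOURCE B (Python) =====
-- def ret_od2_repr(seq: str) -> str:
--     """OD2 representation of an IDT sequence, computed segment-wise:
--     split on '+', lowercase the first segment, and for every later
--     non-empty segment keep its first base (the LNA base) and lowercase
--     the rest; empty segments (doubled or trailing '+') contribute nothing."""
--     assert seq.upper() == seq, "IDT bases should be upper case"
--     parts = seq.split("+")
--     out = [parts[0].lower()]
--     for p in parts[1:]:
--         if p:
--             out.append(p[0] + p[1:].lower())
--     return "".join(out)
-- ===== Notes on version B (the rewrite author's own statement) =====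
-- stated objective: simpler
-- what changed: Replaced A's char-by-char is_lna state machine with a staged split-on-'+' pass: lowercase the first segment, and for each later non-empty segment keep its first base and lowercase the rest.
import Mathlib
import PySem

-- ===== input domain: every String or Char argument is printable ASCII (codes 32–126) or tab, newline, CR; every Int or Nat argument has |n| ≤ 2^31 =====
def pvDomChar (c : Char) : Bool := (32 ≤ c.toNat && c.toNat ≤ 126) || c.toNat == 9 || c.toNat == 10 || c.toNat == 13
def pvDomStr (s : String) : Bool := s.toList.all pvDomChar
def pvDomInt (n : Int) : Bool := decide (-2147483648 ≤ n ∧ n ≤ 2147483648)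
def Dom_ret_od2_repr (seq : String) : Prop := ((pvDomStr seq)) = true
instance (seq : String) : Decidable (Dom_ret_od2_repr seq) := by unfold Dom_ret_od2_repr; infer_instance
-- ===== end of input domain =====

-- B replaces A's char-by-char is_lna state machine by a staged split-on-'+' segment pass (simpler decomposition, same cost).

-- ===== PORT A =====
def ret_od2_repr (seq : String) : String :=
  -- for i, a in enumerate(seq): state (is_lna, od2_seq)
  let r := seq.toList.foldl
    (fun (st : Bool × List Char) (a : Char) =>
      if a = '+' then (true, st.2)
      else (false, st.2 ++ [if st.1 then a else PySem.Chars.lowerChar a]))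
    (false, [])
  PySem.Str.join "" (r.2.map (fun c => String.ofList [c]))

-- ===== PORT B =====
def ret_od2_repr_alt (seq : String) : String :=
  -- parts = seq.split("+")
  let parts := PySem.Chars.splitOn seq.toList ['+']
  -- out = [parts[0].lower()]; for p in parts[1:]: if p: out.append(p[0] + p[1:].lower())
  let out := parts.tail.foldl
    (fun (acc : List String) (p : List Char) =>
      match p with
      | [] => acc
      | c :: t => acc ++ [String.ofList (c :: PySem.Chars.lower t)])
    [String.ofList (PySem.Chars.lower (parts.headD []))]
  PySem.Str.join "" out

-- ===== PRECONDITION & SPEC =====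
-- A's per-character assert raises AssertionError on any character changed by .upper(); Pre_ excludes exactly those inputs (B's global assert raises there too).
def Pre_ret_od2_repr (seq : String) : Prop :=
  (seq.toList.all (fun c => PySem.Chars.upperChar c == c)) = true
instance (seq : String) : Decidable (Pre_ret_od2_repr seq) := by unfold Pre_ret_od2_repr; infer_instance
def pvWitness_ret_od2_repr : String := "G+AT++C+"
def Spec_ret_od2_repr (seq : String) (out : String) : Prop := out = ret_od2_repr_alt seq
instance (seq : String) (out : String) : Decidable (Spec_ret_od2_repr seq out) := by unfold Spec_ret_od2_repr; infer_instance

-- ===== CLAIM (what is proved, stated in full; the proofs are below) =====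
def Claim_equal_ret_od2_repr : Prop := ∀ (seq : String), Dom_ret_od2_repr seq → Pre_ret_od2_repr seq → Spec_ret_od2_repr seq (ret_od2_repr seq)

-- ===== LEMMAS AND PROOFS =====

-- the list of characters A's loop emits, starting with flag b
def pvEmitA : Bool → List Char → List Char
  | _, [] => []
  | b, a :: t =>
    if a = '+' then pvEmitA true t
    else (if b then a else PySem.Chars.lowerChar a) :: pvEmitA false t

theorem pvFoldlA (l : List Char) (b : Bool) (acc : List Char) :
    (l.foldl
      (fun (st : Bool × List Char) (a : Char) =>
        if a = '+' then (true, st.2)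
        else (false, st.2 ++ [if st.1 then a else PySem.Chars.lowerChar a]))
      (b, acc)).2 = acc ++ pvEmitA b l := by
  induction l generalizing b acc with
  | nil => simp [pvEmitA]
  | cons a t ih =>
    by_cases ha : a = '+' <;> simp [pvEmitA, ha, ih, List.append_assoc]

-- structural version of Python's split on the single character '+'
def pvSplit : List Char → List (List Char)
  | [] => [[]]
  | c :: t =>
    if c = '+' then [] :: pvSplit t
    else
      match pvSplit t with
      | [] => [[c]]
      | h :: r => (c :: h) :: r

theorem pvSplit_ne_nil (l : List Char) : pvSplit l ≠ [] := by
  cases l with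
  | nil => simp [pvSplit]
  | cons c t =>
    by_cases hc : c = '+'
    · simp [pvSplit, hc]
    · simp only [pvSplit, hc, if_false]
      cases pvSplit t <;> simp

theorem pvSplit_go (l : List Char) : ∀ (fuel : Nat) (cur : List Char) (acc : List (List Char)),
    l.length < fuel →
    PySem.Chars.splitOn.go ['+'] fuel l cur acc =
      acc.reverse ++ ((cur.reverse ++ (pvSplit l).headD []) :: (pvSplit l).tail) := by
  induction l with
  | nil =>
    intro fuel cur acc h
    match fuel with
    | fuel + 1 => simp [PySem.Chars.splitOn.go, pvSplit]
  | cons c t ih =>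
    intro fuel cur acc h
    match fuel with
    | fuel + 1 =>
      by_cases hc : c = '+'
      · subst hc
        rw [show PySem.Chars.splitOn.go ['+'] (fuel + 1) ('+' :: t) cur acc
              = PySem.Chars.splitOn.go ['+'] fuel t [] (cur.reverse :: acc) from by
            simp [PySem.Chars.splitOn.go, List.isPrefixOf]]
        rw [ih fuel [] (cur.reverse :: acc) (by simpa using Nat.lt_of_succ_lt_succ h)]
        obtain ⟨h0, r, hr⟩ : ∃ h0 r, pvSplit t = h0 :: r := by
          cases hs : pvSplit t with
          | nil => exact absurd hs (pvSplit_ne_nil t)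
          | cons h0 r => exact ⟨h0, r, rfl⟩
        simp [pvSplit, hr]
      · have hc' : ('+' == c) = false := beq_eq_false_iff_ne.mpr (Ne.symm hc)
        rw [show PySem.Chars.splitOn.go ['+'] (fuel + 1) (c :: t) cur acc
              = PySem.Chars.splitOn.go ['+'] fuel t (c :: cur) acc from by
            simp [PySem.Chars.splitOn.go, List.isPrefixOf, hc']]
        rw [ih fuel (c :: cur) acc (by simpa using Nat.lt_of_succ_lt_succ h)]
        obtain ⟨h0, r, hr⟩ : ∃ h0 r, pvSplit t = h0 :: r := by
          cases hs : pvSplit t with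
          | nil => exact absurd hs (pvSplit_ne_nil t)
          | cons h0 r => exact ⟨h0, r, rfl⟩
        simp [pvSplit, hc, hr]

theorem pvSplitOn_eq (l : List Char) : PySem.Chars.splitOn l ['+'] = pvSplit l := by
  have := pvSplit_go l (l.length + 1) [] [] (by omega)
  simp only [PySem.Chars.splitOn, this, List.reverse_nil, List.nil_append]
  obtain ⟨h0, r, hr⟩ : ∃ h0 r, pvSplit l = h0 :: r := by
    cases hs : pvSplit l with
    | nil => exact absurd hs (pvSplit_ne_nil l)
    | cons h0 r => exact ⟨h0, r, rfl⟩
  simp [hr]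

-- what a later segment contributes to the output
def pvSegOut : List Char → List Char
  | [] => []
  | c :: t => c :: PySem.Chars.lower t

def pvRestOut (r : List (List Char)) : List Char := (r.map pvSegOut).flatten

-- A's state machine, read segment-wise
theorem pvEmitA_split (l : List Char) :
    pvEmitA true l = pvRestOut (pvSplit l) ∧
    pvEmitA false l = PySem.Chars.lower ((pvSplit l).headD []) ++ pvRestOut (pvSplit l).tail := by
  induction l with
  | nil => simp [pvEmitA, pvSplit, pvRestOut, pvSegOut, PySem.Chars.lower]
  | cons c t ih =>
    by_cases hc : c = '+'
    · subst hc
      constructor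
      · simp [pvEmitA, pvSplit, pvRestOut, ih.1, pvSegOut]
      · simp [pvEmitA, pvSplit, pvRestOut, ih.1, PySem.Chars.lower]
    · obtain ⟨h0, r, hr⟩ : ∃ h0 r, pvSplit t = h0 :: r := by
        cases hs : pvSplit t with
        | nil => exact absurd hs (pvSplit_ne_nil t)
        | cons h0 r => exact ⟨h0, r, rfl⟩
      have h2 := ih.2
      rw [hr] at h2
      constructor
      · simp [pvEmitA, hc, pvSplit, hr, pvRestOut, pvSegOut, h2]
      · simp [pvEmitA, hc, pvSplit, hr, pvRestOut, h2, PySem.Chars.lower]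

theorem pvJoinNil (l : List (List Char)) : PySem.Chars.join [] l = l.flatten := by
  unfold PySem.Chars.join
  induction l with
  | nil => rfl
  | cons h t ih => cases t <;> simp_all [List.intercalate, List.intersperse]

-- B's foldl over the later segments, flattened
theorem pvFoldlB (r : List (List Char)) (acc : List String) :
    ((r.foldl
      (fun (acc : List String) (p : List Char) =>
        match p with
        | [] => acc
        | c :: t => acc ++ [String.ofList (c :: PySem.Chars.lower t)])
      acc).map String.toList).flatten
      = (acc.map String.toList).flatten ++ pvRestOut r := by
  induction r generalizing acc with
  | nil => simp [pvRestOut]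
  | cons p t ih =>
    cases p with
    | nil => simp [List.foldl_cons, ih, pvRestOut, pvSegOut]
    | cons c q => simp [List.foldl_cons, ih, pvRestOut, pvSegOut]

-- ===== VERDICT (by name: the statement is the Claim_ definition above) =====
theorem ret_od2_repr_spec : Claim_equal_ret_od2_repr := by
  intro seq _ _
  show ret_od2_repr seq = ret_od2_repr_alt seq
  apply String.toList_inj.mp
  unfold ret_od2_repr ret_od2_repr_alt
  simp only [pvFoldlA, List.nil_append, pvSplitOn_eq, PySem.Str.toList_join, List.map_map]
  have hsep : ("" : String).toList = [] := rfl
  rw [hsep]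
  have hmap : (String.toList ∘ fun c => String.ofList [c] : Char → List Char)
      = fun c => [c] := by funext c; simp
  rw [hmap, PySem.Chars.join_nil_singletons, pvJoinNil, pvFoldlB]
  simp [(pvEmitA_split seq.toList).2]
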